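-- pv_equiv track=rewrite | github.com/yasyfiana/EkstraKtor-Tucil4 | src/BM.py | LastOccur
-- ===== SOURCE A (Python) =====
-- def LastOccur(text, pattern):
--     # last = [-1 for x in range(len(text))]
--     last = {}
--     for x in range(len(text)):
--         if((text[x] in last) == False):
--             char = text[x]
--             hasil = -1
--             for y in range(len(pattern)):
--                 if(char == pattern[y]):
--                     hasil = y
--             last[char] = hasil
--     return(last)
-- ===== SOURCE B (Python) =====
-- def LastOccur(text, pattern):
--     # Two sequential passes: seed every text char with -1 (keys keep first-appearance
--     # order), then sweep the pattern once, letting later indices overwrite earlier ones.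
--     last = {}
--     for ch in text:
--         last[ch] = -1
--     for y in range(len(pattern)):
--         if pattern[y] in last:
--             last[pattern[y]] = y
--     return last
-- ===== Notes on version B (the rewrite author's own statement) =====
-- stated objective: faster
-- what changed: Replaces A's per-new-char full rescan of the pattern with two sequential passes: seed each text char with -1, then one pattern sweep whose later indices overwrite earlier ones.
import Mathlib
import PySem

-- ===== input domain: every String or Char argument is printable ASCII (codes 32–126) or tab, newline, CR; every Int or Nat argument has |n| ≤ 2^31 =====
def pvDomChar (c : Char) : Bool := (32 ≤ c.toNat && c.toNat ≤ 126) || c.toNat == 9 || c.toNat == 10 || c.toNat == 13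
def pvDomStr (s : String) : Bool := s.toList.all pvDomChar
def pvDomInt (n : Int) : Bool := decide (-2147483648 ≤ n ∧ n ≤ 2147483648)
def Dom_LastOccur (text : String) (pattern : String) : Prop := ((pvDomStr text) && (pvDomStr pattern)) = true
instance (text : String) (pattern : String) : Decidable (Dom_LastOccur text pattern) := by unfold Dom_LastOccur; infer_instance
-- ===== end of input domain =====

-- B replaces A's per-new-char rescan of the whole pattern by two sequential passes
-- (seed each text char with -1, then one pattern sweep overwriting with later indices).

-- Python's one-character string text[x] / pattern[y]
def pvSingle (c : Char) : String := String.ofList [c]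

-- ===== PORT A =====
def LastOccur (text : String) (pattern : String) : List (String × Int) :=
  (text.toList.foldl
    (fun (d : PySem.Dict String Int) c =>
      if d.contains (pvSingle c) then d
      else
        d.insert (pvSingle c)
          (pattern.toList.zipIdx.foldl
            (fun (hasil : Int) p =>
              if pvSingle p.1 == pvSingle c then (p.2 : Int) else hasil) (-1)))
    PySem.Dict.empty).items

-- ===== PORT B =====
def LastOccur_alt (text : String) (pattern : String) : List (String × Int) :=
  let d1 := text.toList.foldl
    (fun (d : PySem.Dict String Int) c => d.insert (pvSingle c) (-1)) PySem.Dict.empty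
  let d2 := pattern.toList.zipIdx.foldl
    (fun (d : PySem.Dict String Int) p =>
      if d.contains (pvSingle p.1) then d.insert (pvSingle p.1) (p.2 : Int) else d) d1
  d2.items

-- ===== PRECONDITION & SPEC =====
def Spec_LastOccur (text : String) (pattern : String) (out : List (String × Int)) : Prop := out = LastOccur_alt text pattern
instance (text : String) (pattern : String) (out : List (String × Int)) : Decidable (Spec_LastOccur text pattern out) := by unfold Spec_LastOccur; infer_instance

-- ===== CLAIM (what is proved, stated in full; the proofs are below) =====
def Claim_equal_LastOccur : Prop := ∀ (text : String) (pattern : String), Dom_LastOccur text pattern → Spec_LastOccur text pattern (LastOccur text pattern)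

-- ===== LEMMAS AND PROOFS =====

-- the value A computes for key s over the (char, index) list pl, starting from h0
def pvG (pl : List (Char × Nat)) (s : String) (h0 : Int) : Int :=
  pl.foldl (fun (hasil : Int) p => if pvSingle p.1 == s then (p.2 : Int) else hasil) h0

theorem pvContains_mk (S : List String) (f : String → Int) (s : String) :
    (PySem.Dict.mk (S.map (fun t => (t, f t)))).contains s = decide (s ∈ S) := by
  rw [PySem.Dict.contains_eq_decide_mem_keys]
  have hk : (PySem.Dict.mk (S.map (fun t => (t, f t)))).keys = S := by
    simp [PySem.Dict.keys, Function.comp_def]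
  rw [hk]

theorem pvInsert_mk_not_mem (S : List String) (f : String → Int) (s : String) (v : Int)
    (h : s ∉ S) (hf : f s = v) :
    (PySem.Dict.mk (S.map (fun t => (t, f t)))).insert s v
      = PySem.Dict.mk ((S ++ [s]).map (fun t => (t, f t))) := by
  apply PySem.Dict.ext
  rw [PySem.Dict.items_insert_of_not_contains]
  · simp [hf]
  · rw [pvContains_mk]
    simp [h]

theorem pvA_fold (pl : List (Char × Nat)) (l : List Char) (S : List String) :
    (l.foldl
      (fun (d : PySem.Dict String Int) c =>
        if d.contains (pvSingle c) then d
        else d.insert (pvSingle c) (pvG pl (pvSingle c) (-1)))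
      (PySem.Dict.mk (S.map (fun s => (s, pvG pl s (-1)))))).items
    = (PySem.Set.update S (l.map pvSingle)).map (fun s => (s, pvG pl s (-1))) := by
  induction l generalizing S with
  | nil => simp [PySem.Set.update]
  | cons c l ih =>
    simp only [List.foldl_cons, List.map_cons, PySem.Set.update_cons]
    by_cases h : pvSingle c ∈ S
    · rw [pvContains_mk]
      simp only [h, decide_true, if_true, PySem.Set.add_of_mem h]
      exact ih S
    · rw [pvContains_mk]
      simp only [h, decide_false, Bool.false_eq_true, if_false]
      rw [pvInsert_mk_not_mem _ _ _ _ h rfl, PySem.Set.add_of_not_mem h]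
      exact ih (S ++ [pvSingle c])

theorem pvB1_fold (l : List Char) (S : List String) :
    (l.foldl
      (fun (d : PySem.Dict String Int) c => d.insert (pvSingle c) (-1))
      (PySem.Dict.mk (S.map (fun s => (s, (-1 : Int)))))).items
    = (PySem.Set.update S (l.map pvSingle)).map (fun s => (s, (-1 : Int))) := by
  induction l generalizing S with
  | nil => simp [PySem.Set.update]
  | cons c l ih =>
    simp only [List.foldl_cons, List.map_cons, PySem.Set.update_cons]
    by_cases h : pvSingle c ∈ S
    · have hins : (PySem.Dict.mk (S.map (fun s => (s, (-1 : Int))))).insert (pvSingle c) (-1)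
        = PySem.Dict.mk (S.map (fun s => (s, (-1 : Int)))) := by
        apply PySem.Dict.ext
        rw [PySem.Dict.items_insert_of_contains]
        · simp only [List.map_map]
          apply List.map_congr_left
          intro t _
          by_cases ht : t = pvSingle c <;> simp [ht]
        · rw [pvContains_mk]
          simp [h]
      rw [hins, PySem.Set.add_of_mem h]
      exact ih S
    · rw [pvInsert_mk_not_mem _ (fun _ => (-1 : Int)) _ _ h rfl, PySem.Set.add_of_not_mem h]
      exact ih (S ++ [pvSingle c])

theorem pvB2_fold (pl : List (Char × Nat)) (S : List String) (v : String → Int) :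
    (pl.foldl
      (fun (d : PySem.Dict String Int) p =>
        if d.contains (pvSingle p.1) then d.insert (pvSingle p.1) (p.2 : Int) else d)
      (PySem.Dict.mk (S.map (fun s => (s, v s))))).items
    = S.map (fun s => (s, pvG pl s (v s))) := by
  induction pl generalizing v with
  | nil => simp [pvG]
  | cons p pl ih =>
    simp only [List.foldl_cons]
    by_cases h : pvSingle p.1 ∈ S
    · rw [pvContains_mk]
      simp only [h, decide_true, if_true]
      have hins : (PySem.Dict.mk (S.map (fun s => (s, v s)))).insert (pvSingle p.1) (p.2 : Int)
          = PySem.Dict.mk (S.map (fun s =>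
              (s, if pvSingle p.1 == s then (p.2 : Int) else v s))) := by
        apply PySem.Dict.ext
        rw [PySem.Dict.items_insert_of_contains]
        · simp only [List.map_map]
          apply List.map_congr_left
          intro t _
          by_cases ht : t = pvSingle p.1
          · subst ht; simp
          · have h1 : (t == pvSingle p.1) = false := by simp [ht]
            have h2 : (pvSingle p.1 == t) = false := by
              simp only [beq_eq_false_iff_ne]; exact fun e => ht e.symm
            simp [h2]
            exact fun e => absurd e ht
        · rw [pvContains_mk]
          simp [h]
      rw [hins, ih]
      apply List.map_congr_left
      intro t _
      simp only [pvG, List.foldl_cons]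
    · rw [pvContains_mk]
      simp only [h, decide_false, Bool.false_eq_true, if_false]
      rw [ih]
      apply List.map_congr_left
      intro t ht
      have hne : (pvSingle p.1 == t) = false := by
        simp only [beq_eq_false_iff_ne]; exact fun e => h (e ▸ ht)
      simp only [pvG, List.foldl_cons, hne, Bool.false_eq_true, if_false]

-- ===== VERDICT (by name: the statement is the Claim_ definition above) =====
theorem LastOccur_spec : Claim_equal_LastOccur := by
  intro text pattern _
  unfold Spec_LastOccur LastOccur LastOccur_alt
  have hA := pvA_fold pattern.toList.zipIdx text.toList []
  have hB1 := pvB1_fold text.toList []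
  have hB2 := pvB2_fold pattern.toList.zipIdx
      (PySem.Set.update [] (text.toList.map pvSingle)) (fun _ => (-1 : Int))
  simp only [List.map_nil] at hA hB1
  have hempty : (PySem.Dict.empty : PySem.Dict String Int) = PySem.Dict.mk [] := rfl
  rw [hempty]
  have d1eq : text.toList.foldl
      (fun (d : PySem.Dict String Int) c => d.insert (pvSingle c) (-1)) (PySem.Dict.mk [])
      = PySem.Dict.mk ((PySem.Set.update [] (text.toList.map pvSingle)).map
          (fun s => (s, (-1 : Int)))) := PySem.Dict.ext hB1
  rw [d1eq]
  simp only [pvG] at hA hB2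
  rw [hB2]
  exact hA
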